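-- pv_equiv track=rewrite | github.com/nilabja9/legend-cli | legend_cli/prompts/enum_templates.py | _is_enum_column_name
-- ===== SOURCE A (Python) =====
-- def _is_enum_column_name(column_name: str) -> bool:
--     """Check if column name suggests an enumeration."""
--     suffixes = (
--         "_TYPE", "_STATUS", "_CODE", "_CATEGORY", "_KIND",
--         "_CLASS", "_MODE", "_STATE", "_LEVEL", "_PRIORITY",
--         "_METHOD", "_REASON", "_SOURCE"
--     )
--     name_upper = column_name.upper()
--     return any(name_upper.endswith(suffix) for suffix in suffixes)
-- ===== SOURCE B (Python) =====
-- _ENUM_SUFFIX_WORDS = {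
--     "TYPE", "STATUS", "CODE", "CATEGORY", "KIND",
--     "CLASS", "MODE", "STATE", "LEVEL", "PRIORITY",
--     "METHOD", "REASON", "SOURCE",
-- }
--
--
-- def _is_enum_column_name(column_name: str) -> bool:
--     """Check if column name suggests an enumeration."""
--     _, sep, tail = column_name.upper().rpartition("_")
--     return sep == "_" and tail in _ENUM_SUFFIX_WORDS
-- ===== Notes on version B (the rewrite author's own statement) =====
-- stated objective: idiomatic
-- what changed: Instead of testing endswith against each of 13 suffixes in a loop, B extracts the token after the last underscore once with rpartition and does a single set-membership test (the sep check keeps names without an underscore False).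
import Mathlib
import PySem

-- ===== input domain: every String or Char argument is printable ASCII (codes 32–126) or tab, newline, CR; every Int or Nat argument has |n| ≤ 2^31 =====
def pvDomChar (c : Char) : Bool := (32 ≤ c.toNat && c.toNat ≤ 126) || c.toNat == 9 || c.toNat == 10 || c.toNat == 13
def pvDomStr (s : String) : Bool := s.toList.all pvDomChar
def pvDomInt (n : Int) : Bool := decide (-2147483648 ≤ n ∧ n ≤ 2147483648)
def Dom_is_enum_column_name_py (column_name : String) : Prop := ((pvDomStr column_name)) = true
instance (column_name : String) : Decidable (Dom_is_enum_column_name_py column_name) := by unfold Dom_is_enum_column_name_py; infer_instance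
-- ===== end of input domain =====

-- B replaces A's loop of endswith tests over 13 suffixes by one rpartition at the last
-- underscore plus a single set-membership test (idiomatic, one pass over the name).

-- ===== PORT A =====
def is_enum_column_name_py (column_name : String) : Bool :=
  let suffixes : List String :=
    ["_TYPE", "_STATUS", "_CODE", "_CATEGORY", "_KIND",
     "_CLASS", "_MODE", "_STATE", "_LEVEL", "_PRIORITY",
     "_METHOD", "_REASON", "_SOURCE"]
  let name_upper := PySem.Str.upper column_name
  suffixes.any (fun suffix => PySem.Str.endswith name_upper suffix)

-- ===== PORT B =====
-- the set literal _ENUM_SUFFIX_WORDS (distinct elements, membership test only)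
def enumSuffixWords : List (List Char) :=
  ["TYPE".toList, "STATUS".toList, "CODE".toList, "CATEGORY".toList, "KIND".toList,
   "CLASS".toList, "MODE".toList, "STATE".toList, "LEVEL".toList, "PRIORITY".toList,
   "METHOD".toList, "REASON".toList, "SOURCE".toList]

-- hand port of str.rpartition("_") (PySem has no rpartition): split at the LAST '_';
-- if none, the whole string is the third component and sep is empty — exact.
def pyRpartitionUnderscore (cs : List Char) : List Char × List Char × List Char :=
  let r := cs.reverse
  let t := r.takeWhile (fun c => c != '_')
  if t.length = r.length then ([], [], cs)
  else ((r.drop (t.length + 1)).reverse, ['_'], t.reverse)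

def is_enum_column_name_py_alt (column_name : String) : Bool :=
  let parts := pyRpartitionUnderscore (PySem.Str.upper column_name).toList
  parts.2.1 == ['_'] && enumSuffixWords.contains parts.2.2

-- ===== PRECONDITION & SPEC =====
def Spec_is_enum_column_name_py (column_name : String) (out : Bool) : Prop := out = is_enum_column_name_py_alt column_name
instance (column_name : String) (out : Bool) : Decidable (Spec_is_enum_column_name_py column_name out) := by unfold Spec_is_enum_column_name_py; infer_instance

-- ===== CLAIM (what is proved, stated in full; the proofs are below) =====
def Claim_equal_is_enum_column_name_py : Prop := ∀ (column_name : String), Dom_is_enum_column_name_py column_name → Spec_is_enum_column_name_py column_name (is_enum_column_name_py column_name)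

-- ===== LEMMAS AND PROOFS =====

-- core: for v without '_', "v ++ ['_'] is a prefix of r" ⟺ the segment of r before its
-- first '_' is exactly v, and r does contain a '_' (lengths of takeWhile and r differ).
theorem rpart_core (r v : List Char) (hv : '_' ∉ v) :
    (v ++ ['_'] <+: r) ↔
      (r.takeWhile (fun c => c != '_') = v ∧
       (r.takeWhile (fun c => c != '_')).length ≠ r.length) := by
  constructor
  · rintro ⟨rest, hr⟩
    have hr' : r = v ++ '_' :: rest := by simpa using hr.symm
    subst hr'
    have hval : (v ++ '_' :: rest).takeWhile (fun c => c != '_') = v := by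
      rw [List.takeWhile_append]
      have hvtake : v.takeWhile (fun c => c != '_') = v :=
        List.takeWhile_eq_self_iff.mpr (fun c hc => by
          simp [bne_iff_ne]; rintro rfl; exact hv hc)
      simp [hvtake]
    refine ⟨hval, ?_⟩
    rw [hval]
    simp
  · rintro ⟨ht, hlen⟩
    have hsplit := List.takeWhile_append_dropWhile (p := fun c => c != '_') (l := r)
    set d := r.dropWhile (fun c => c != '_') with hd
    have hdne : d ≠ [] := by
      intro h0
      apply hlen
      conv_rhs => rw [← hsplit]
      rw [h0, List.append_nil]
    have hhead : (d.head hdne) = '_' := by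
      have := List.head_dropWhile_not (fun c => c != '_') (l := r) (by rw [← hd]; exact hdne)
      simpa [bne_eq_false_iff_eq] using this
    refine ⟨d.tail, ?_⟩
    calc v ++ ['_'] ++ d.tail = v ++ ('_' :: d.tail) := by simp
    _ = r.takeWhile (fun c => c != '_') ++ (d.head hdne :: d.tail) := by rw [ht, hhead]
    _ = r.takeWhile (fun c => c != '_') ++ d := by rw [List.cons_head_tail]
    _ = r := hsplit

-- each endswith test of A, expressed through B's rpartition data
theorem endswith_rpart (u w : List Char) (hw : '_' ∉ w) :
    PySem.Chars.endswith u ('_' :: w) =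
      ((u.reverse.takeWhile (fun c => c != '_')) == w.reverse &&
       !((u.reverse.takeWhile (fun c => c != '_')).length == u.reverse.length)) := by
  rw [Bool.eq_iff_iff, PySem.Chars.endswith_iff]
  rw [show ('_' :: w <:+ u) ↔ (w.reverse ++ ['_'] <+: u.reverse) by
    rw [← List.reverse_prefix]; simp]
  rw [rpart_core u.reverse w.reverse (by simpa using hw)]
  simp [Bool.and_eq_true, beq_iff_eq, beq_eq_false_iff_ne, ne_eq]

-- ===== VERDICT (by name: the statement is the Claim_ definition above) =====
theorem is_enum_column_name_py_spec : Claim_equal_is_enum_column_name_py := by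
  intro s _
  unfold Spec_is_enum_column_name_py is_enum_column_name_py is_enum_column_name_py_alt
  unfold pyRpartitionUnderscore enumSuffixWords
  simp only [List.any_cons, List.any_nil, PySem.Str.endswith_eq]
  set u := (PySem.Str.upper s).toList with hu
  rw [show ("_TYPE" : String).toList = '_' :: "TYPE".toList from rfl,
      show ("_STATUS" : String).toList = '_' :: "STATUS".toList from rfl,
      show ("_CODE" : String).toList = '_' :: "CODE".toList from rfl,
      show ("_CATEGORY" : String).toList = '_' :: "CATEGORY".toList from rfl,
      show ("_KIND" : String).toList = '_' :: "KIND".toList from rfl,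
      show ("_CLASS" : String).toList = '_' :: "CLASS".toList from rfl,
      show ("_MODE" : String).toList = '_' :: "MODE".toList from rfl,
      show ("_STATE" : String).toList = '_' :: "STATE".toList from rfl,
      show ("_LEVEL" : String).toList = '_' :: "LEVEL".toList from rfl,
      show ("_PRIORITY" : String).toList = '_' :: "PRIORITY".toList from rfl,
      show ("_METHOD" : String).toList = '_' :: "METHOD".toList from rfl,
      show ("_REASON" : String).toList = '_' :: "REASON".toList from rfl,
      show ("_SOURCE" : String).toList = '_' :: "SOURCE".toList from rfl]
  rw [endswith_rpart u _ (by decide), endswith_rpart u _ (by decide),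
      endswith_rpart u _ (by decide), endswith_rpart u _ (by decide),
      endswith_rpart u _ (by decide), endswith_rpart u _ (by decide),
      endswith_rpart u _ (by decide), endswith_rpart u _ (by decide),
      endswith_rpart u _ (by decide), endswith_rpart u _ (by decide),
      endswith_rpart u _ (by decide), endswith_rpart u _ (by decide),
      endswith_rpart u _ (by decide)]
  by_cases h : (u.reverse.takeWhile (fun c => c != '_')).length = u.reverse.length
  · simp [h]
  · simp only [h, if_false]
    have hb : ((u.reverse.takeWhile (fun c => c != '_')).length == u.length) = false := by
      simpa using h
    simp [hb, beq_eq_decide]
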